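-- pv_equiv track=rewrite | github.com/ltfafei/py_Leetcode_study | interesting_Number/21.bin_1_maxDistance.py | func
-- ===== SOURCE A (Python) =====
-- def func(N):
--     cur = -1  #标记当前位置
--     max_ = 0  #标记最长距离
--     while N > 0:
--         if N & 1 == 1:  #找到1
--             #等于1，cur置0
--             if cur != -1 and max_ < cur + 1:
--                 max_ = cur + 1
--             cur = 0
--         elif cur != -1:
--             cur = cur + 1
--         N = N >> 1
--     return max_
-- ===== SOURCE B (Python) =====
-- def func(N):
--     # Phase 1: record the bit index of every set bit.
--     positions = []
--     i = 0
--     while N > 0: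
--         if N & 1 == 1:
--             positions.append(i)
--         N >>= 1
--         i += 1
--     # Phase 2: maximum gap between consecutive set bits.
--     best = 0
--     for prev, cur in zip(positions, positions[1:]):
--         if cur - prev > best:
--             best = cur - prev
--     return best
-- ===== Notes on version B (the rewrite author's own statement) =====
-- stated objective: alternative
-- what changed: A tracks a running distance counter and max in one pass over the bits; B first collects the indices of all set bits into a list and then takes the maximum difference over consecutive pairs in a separate zip pass.
import Mathlib
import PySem

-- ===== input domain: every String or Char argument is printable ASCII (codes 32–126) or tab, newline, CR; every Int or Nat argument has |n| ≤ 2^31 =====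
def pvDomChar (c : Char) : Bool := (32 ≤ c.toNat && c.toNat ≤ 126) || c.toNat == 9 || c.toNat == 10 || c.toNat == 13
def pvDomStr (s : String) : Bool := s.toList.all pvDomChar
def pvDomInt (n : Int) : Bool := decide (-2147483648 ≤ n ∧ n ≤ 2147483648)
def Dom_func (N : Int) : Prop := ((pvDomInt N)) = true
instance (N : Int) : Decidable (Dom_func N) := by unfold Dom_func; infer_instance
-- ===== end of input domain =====

-- B replaces A's single-pass running-distance tracking by two phases: first collect the
-- indices of all set bits, then take the maximum consecutive difference (objective: alternative).

theorem pvShiftHalf_lt (N : Int) (h : 0 < N) : (N >>> (1:Nat)).toNat < N.toNat := by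
  rw [Int.shiftRight_eq_div_pow]; omega

-- ===== PORT A =====
-- while N > 0: test N & 1, track cur (distance counter) and max_.
-- Python 'N & 1' is PySem.Int.band N 1; 'N >> 1' is core '>>> (1:Nat)' (both exact).
def funcLoop (N cur max_ : Int) : Int :=
  if h : 0 < N then
    if PySem.Int.band N 1 == 1 then
      funcLoop (N >>> (1:Nat)) 0 (if cur ≠ -1 ∧ max_ < cur + 1 then cur + 1 else max_)
    else
      funcLoop (N >>> (1:Nat)) (if cur ≠ -1 then cur + 1 else cur) max_
  else max_
termination_by N.toNat
decreasing_by all_goals exact pvShiftHalf_lt N h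

def func (N : Int) : Int := funcLoop N (-1) 0

-- ===== PORT B =====
-- phase 1: record the index of every set bit (same scanning loop, accumulator = list).
def posLoop (N i : Int) (positions : List Int) : List Int :=
  if h : 0 < N then
    posLoop (N >>> (1:Nat)) (i + 1)
      (if PySem.Int.band N 1 == 1 then positions ++ [i] else positions)
  else positions
termination_by N.toNat
decreasing_by all_goals exact pvShiftHalf_lt N h

-- phase 2: 'for prev, cur in zip(positions, positions[1:])' keeping the largest cur - prev.
def func_alt (N : Int) : Int :=
  let positions := posLoop N 0 []
  (positions.zip (PySem.List.slice positions (some 1) none)).foldl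
    (fun best pc => if pc.2 - pc.1 > best then pc.2 - pc.1 else best) 0

-- ===== PRECONDITION & SPEC =====
def Spec_func (N : Int) (out : Int) : Prop := out = func_alt N
instance (N : Int) (out : Int) : Decidable (Spec_func N out) := by unfold Spec_func; infer_instance

-- ===== CLAIM (what is proved, stated in full; the proofs are below) =====
def Claim_equal_func : Prop := ∀ (N : Int), Dom_func N → Spec_func N (func N)

-- ===== LEMMAS AND PROOFS =====

-- mathematical list of set-bit indices of N, starting at index i
def pos (N i : Int) : List Int :=
  if h : 0 < N then
    (if PySem.Int.band N 1 == 1 then [i] else []) ++ pos (N >>> (1:Nat)) (i + 1)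
  else []
termination_by N.toNat
decreasing_by all_goals exact pvShiftHalf_lt N h

-- fold the consecutive gaps of ps, given the index of the previously seen set bit
def gapsFrom (ps : List Int) (last best : Int) : Int :=
  match ps with
  | [] => best
  | p :: rest => gapsFrom rest p (if p - last > best then p - last else best)

theorem posLoop_eq (N : Int) : ∀ i acc, posLoop N i acc = acc ++ pos N i := by
  induction hn : N.toNat using Nat.strong_induction_on generalizing N with
  | _ n IH =>
    intro i acc
    rw [posLoop, pos]
    by_cases h : 0 < N
    · simp only [h, dif_pos]
      rw [IH (N >>> (1:Nat)).toNat (hn ▸ pvShiftHalf_lt N h) _ rfl]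
      split <;> simp
    · simp [h]

theorem funcLoop_pos (N : Int) :
    ∀ i cur best, 0 ≤ cur → funcLoop N cur best = gapsFrom (pos N i) (i - cur - 1) best := by
  induction hn : N.toNat using Nat.strong_induction_on generalizing N with
  | _ n IH =>
    intro i cur best hcur
    rw [funcLoop, pos]
    by_cases h : 0 < N
    · simp only [h, dif_pos]
      have IH' := IH (N >>> (1:Nat)).toNat (hn ▸ pvShiftHalf_lt N h) _ rfl
      have hne : cur ≠ -1 := by omega
      by_cases hb : (PySem.Int.band N 1 == 1) = true
      · rw [if_pos hb, if_pos hb, IH' (i + 1) 0 _ le_rfl]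
        simp only [List.cons_append, List.nil_append, gapsFrom]
        congr 1
        · omega
        · split_ifs <;> omega
      · rw [if_neg hb, if_neg hb, List.nil_append, if_pos hne,
            IH' (i + 1) (cur + 1) _ (by omega)]
        congr 1
        omega
    · simp [h, gapsFrom]

theorem funcLoop_neg (N : Int) :
    ∀ i best, funcLoop N (-1) best =
      (match pos N i with
       | [] => best
       | p :: rest => gapsFrom rest p best) := by
  induction hn : N.toNat using Nat.strong_induction_on generalizing N with
  | _ n IH =>
    intro i best
    rw [funcLoop, pos]
    by_cases h : 0 < N
    · simp only [h, dif_pos]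
      by_cases hb : (PySem.Int.band N 1 == 1) = true
      · rw [if_pos hb, if_pos hb,
            if_neg (by omega : ¬((-1 : Int) ≠ -1 ∧ best < -1 + 1)),
            funcLoop_pos (N >>> (1:Nat)) (i + 1) 0 best le_rfl]
        simp only [List.cons_append, List.nil_append]
        congr 1
        omega
      · rw [if_neg hb, if_neg hb, List.nil_append,
            if_neg (by omega : ¬((-1 : Int) ≠ -1))]
        exact IH (N >>> (1:Nat)).toNat (hn ▸ pvShiftHalf_lt N h) _ rfl (i + 1) best
    · simp [h]

-- B's zip-fold equals gapsFrom
theorem zipFold_eq_gapsFrom (rest : List Int) :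
    ∀ p best, (List.zip (p :: rest) rest).foldl
        (fun best pc => if pc.2 - pc.1 > best then pc.2 - pc.1 else best) best
      = gapsFrom rest p best := by
  induction rest with
  | nil => intro p best; simp [gapsFrom]
  | cons q qs IH =>
    intro p best
    simp only [List.zip_cons_cons, List.foldl_cons, gapsFrom]
    exact IH q _

-- ===== VERDICT (by name: the statement is the Claim_ definition above) =====
theorem func_spec : Claim_equal_func := by
  intro N _
  unfold Spec_func func func_alt
  simp only [posLoop_eq N 0 [], List.nil_append, PySem.List.slice_from_one]
  rw [funcLoop_neg N 0 0]
  cases hp : pos N 0 with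
  | nil => simp
  | cons p rest =>
    simp only [List.tail_cons]
    exact (zipFold_eq_gapsFrom rest p 0).symm
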